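-- pv_equiv track=rewrite | github.com/murphygroup/CellSegmentationEvaluator | full_pipeline/pipeline/evaluation/run_pairwise_evaluation.py | get_union
-- ===== SOURCE A (Python) =====
-- def get_union(arr1, arr2):
-- 	a = set((tuple(i) for i in arr1))
-- 	b = set((tuple(i) for i in arr2))
-- 	union = list(a | b)
-- 	if len(union) != 0:
-- 		return len(union)
-- 	else:
-- 		return False
-- ===== SOURCE B (Python) =====
-- def get_union(arr1, arr2):
--     rows = sorted([tuple(i) for i in arr1] + [tuple(i) for i in arr2])
--     if not rows:
--         return False
--     count = 1
--     for prev, cur in zip(rows, rows[1:]):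
--         if cur != prev:
--             count += 1
--     return count
-- ===== Notes on version B (the rewrite author's own statement) =====
-- stated objective: alternative
-- what changed: Replaces A's two hash sets and set union by concatenating both row lists, sorting, and counting distinct rows in one linear scan over adjacent pairs.
-- outside the precondition, e.g. on get_union([], []): A returns False, B returns False
import Mathlib
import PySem

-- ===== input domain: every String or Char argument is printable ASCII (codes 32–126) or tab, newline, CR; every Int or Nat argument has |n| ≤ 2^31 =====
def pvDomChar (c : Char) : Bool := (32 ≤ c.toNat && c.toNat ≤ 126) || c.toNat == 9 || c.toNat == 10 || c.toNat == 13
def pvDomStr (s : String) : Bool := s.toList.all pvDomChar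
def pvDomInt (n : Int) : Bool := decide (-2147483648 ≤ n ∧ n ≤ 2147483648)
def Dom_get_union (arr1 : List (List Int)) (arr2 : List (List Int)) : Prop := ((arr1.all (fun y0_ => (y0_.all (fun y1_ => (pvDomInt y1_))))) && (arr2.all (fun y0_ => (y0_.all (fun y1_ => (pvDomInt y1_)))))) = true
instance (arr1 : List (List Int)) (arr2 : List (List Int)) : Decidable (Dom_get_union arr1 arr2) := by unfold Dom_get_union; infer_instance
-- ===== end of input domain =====

-- B replaces A's two hash sets + union by concatenate-sort-scan (count a new run whenever
-- adjacent sorted rows differ): a different algorithm of similar cost ("alternative").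
-- Python A returns False (== 0) when both inputs are empty; both ports return 0 there.


-- ===== PORT A =====
-- a = set(tuple(i) for i in arr1); b = …; union = list(a | b); return len(union) if nonzero else False (False = 0 : Int)
def get_union (arr1 : List (List Int)) (arr2 : List (List Int)) : Int :=
  let a : PySem.Set (List Int) := PySem.Set.ofList arr1
  let b : PySem.Set (List Int) := PySem.Set.ofList arr2
  let union : List (List Int) := PySem.Set.union a b
  if union.length ≠ 0 then (union.length : Int) else 0

-- ===== PORT B =====
-- rows = sorted(arr1-tuples ++ arr2-tuples); scan adjacent pairs, +1 whenever cur ≠ prev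
def get_union_alt (arr1 : List (List Int)) (arr2 : List (List Int)) : Int :=
  let rows := PySem.List.sorted (arr1.map (fun i => i) ++ arr2.map (fun i => i)) (fun x => x) false
  if rows = [] then 0
  else (rows.zip (PySem.List.slice rows (some 1) none)).foldl
         (fun count p => if p.2 ≠ p.1 then count + 1 else count) 1

-- ===== PRECONDITION & SPEC =====
-- Pre_ excludes only the input where both lists are empty: there Python A returns False, a bool
-- outside the declared int return type (B does the same); on every other input A returns an int.
def Pre_get_union (arr1 : List (List Int)) (arr2 : List (List Int)) : Prop := arr1 ≠ [] ∨ arr2 ≠ []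
instance (arr1 : List (List Int)) (arr2 : List (List Int)) : Decidable (Pre_get_union arr1 arr2) := by unfold Pre_get_union; infer_instance
def pvWitness_get_union : List (List Int) × List (List Int) := ([[1, 2], [1, 2]], [[3]])
def Spec_get_union (arr1 : List (List Int)) (arr2 : List (List Int)) (out : Int) : Prop := out = get_union_alt arr1 arr2
instance (arr1 : List (List Int)) (arr2 : List (List Int)) (out : Int) : Decidable (Spec_get_union arr1 arr2 out) := by unfold Spec_get_union; infer_instance

-- ===== CLAIM (what is proved, stated in full; the proofs are below) =====
def Claim_equal_get_union : Prop := ∀ (arr1 : List (List Int)) (arr2 : List (List Int)), Dom_get_union arr1 arr2 → Pre_get_union arr1 arr2 → Spec_get_union arr1 arr2 (get_union arr1 arr2)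

-- ===== LEMMAS AND PROOFS =====

-- number of places in x :: t where the next element differs from the previous one
def runsFrom {α : Type} [DecidableEq α] (x : α) : List α → Nat
  | [] => 0
  | y :: t => (if y ≠ x then 1 else 0) + runsFrom y t

theorem foldl_zip_runsFrom {α : Type} [DecidableEq α] (t : List α) (x : α) (c : Int) :
    ((x :: t).zip t).foldl (fun count p => if p.2 ≠ p.1 then count + 1 else count) c
      = c + runsFrom x t := by
  induction t generalizing x c with
  | nil => simp [runsFrom]
  | cons y t ih =>
    simp only [List.zip_cons_cons, List.foldl_cons, runsFrom, ih]
    by_cases h : y = x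
    · simp [h]
    · simp [h]
      omega

-- on a ≤-sorted list, 1 + runsFrom counts the distinct elements
theorem runsFrom_sorted_card {α : Type} [DecidableEq α] [LinearOrder α]
    (t : List α) (x : α) (h : (x :: t).Pairwise (· ≤ ·)) :
    1 + runsFrom x t = (x :: t).toFinset.card := by
  induction t generalizing x with
  | nil => simp [runsFrom]
  | cons y t ih =>
    rcases List.pairwise_cons.mp h with ⟨hx, hyt⟩
    by_cases hxy : y = x
    · subst hxy
      have := ih y hyt
      simpa [runsFrom] using this
    · have hxnot : x ∉ y :: t := by
        intro hmem
        rcases List.pairwise_cons.mp hyt with ⟨hy, _⟩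
        rcases List.mem_cons.mp hmem with heq | hmem'
        · exact hxy heq.symm
        · have h1 : x ≤ y := hx y (by simp)
          have h2 : y ≤ x := hy x hmem'
          exact hxy (le_antisymm h2 h1)
      have hcard : (x :: y :: t).toFinset.card = 1 + (y :: t).toFinset.card := by
        rw [List.toFinset_cons, Finset.card_insert_of_notMem (by simpa using hxnot)]
        omega
      have := ih y hyt
      simp only [runsFrom, if_pos hxy]
      omega

theorem union_length_card (arr1 arr2 : List (List Int)) :
    (PySem.Set.union (PySem.Set.ofList arr1) (PySem.Set.ofList arr2) : List (List Int)).length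
      = (arr1 ++ arr2).toFinset.card := by
  set u : List (List Int) := PySem.Set.union (PySem.Set.ofList arr1) (PySem.Set.ofList arr2) with hu
  have hnd : u.Nodup := PySem.Set.nodup_union _ _ (PySem.Set.nodup_ofList arr1)
  have hmem : ∀ y, y ∈ u ↔ y ∈ arr1 ++ arr2 := by
    intro y
    simp [hu, PySem.Set.mem_union, PySem.Set.mem_ofList]
  have hfs : u.toFinset = (arr1 ++ arr2).toFinset := by
    apply Finset.ext
    intro y
    simpa using hmem y
  calc u.length = u.toFinset.card := (List.toFinset_card_of_nodup hnd).symm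
    _ = (arr1 ++ arr2).toFinset.card := by rw [hfs]

-- ===== VERDICT (by name: the statement is the Claim_ definition above) =====
theorem get_union_spec : Claim_equal_get_union := by
  intro arr1 arr2 _ _
  unfold Spec_get_union get_union get_union_alt
  simp only [List.map_id']
  set rows := PySem.List.sorted (arr1 ++ arr2) (fun x => x) false with hrows
  have hperm : rows.Perm (arr1 ++ arr2) := PySem.List.sorted_perm _ _ _
  have hA : (if (PySem.Set.union (PySem.Set.ofList arr1) (PySem.Set.ofList arr2) : List (List Int)).length ≠ 0
      then ((PySem.Set.union (PySem.Set.ofList arr1) (PySem.Set.ofList arr2) : List (List Int)).length : Int) else 0)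
      = ((arr1 ++ arr2).toFinset.card : Int) := by
    rw [← union_length_card arr1 arr2]
    split_ifs with h
    · rfl
    · omega
  rw [hA]
  cases hr : rows with
  | nil =>
    have : arr1 ++ arr2 = [] := by
      have := hperm.length_eq
      rw [hr] at this
      exact List.eq_nil_of_length_eq_zero this.symm
    simp [this]
  | cons x t =>
    have hpw : (x :: t).Pairwise (· ≤ ·) := by
      rw [← hr, hrows]
      have h := PySem.List.sorted_pairwise (arr1 ++ arr2) (fun x : List Int => x)
      convert h using 2 with a b
    have hslice : PySem.List.slice (x :: t) (some 1) none = t := by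
      rw [PySem.List.slice_from_one]
      rfl
    have hfs : (arr1 ++ arr2).toFinset = (x :: t).toFinset := by
      have hp : (x :: t).Perm (arr1 ++ arr2) := hr ▸ hperm
      apply Finset.ext
      intro y
      have hm := hp.mem_iff (a := y)
      simp only [List.mem_append, List.mem_cons] at hm
      simp only [List.mem_toFinset, List.mem_append, List.mem_cons]
      tauto
    simp only [hslice, foldl_zip_runsFrom t x 1, if_neg (by simp : ¬ (x :: t) = [])]
    rw [hfs, ← runsFrom_sorted_card t x hpw]
    push_cast
    ring
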